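-- pv_equiv track=rewrite | github.com/Asinphi/AI-RPG | src/main.py | extract_context_and_usertext
-- ===== SOURCE A (Python) =====
-- def extract_context_and_usertext(context: str):
--     lines = context.split("\n")
--     area = ""
--     context = ""
--     user_resp = ""
--     for line in lines:
--         if line.startswith("Area:"):
--             area = line[len("Area:"):]
--         elif line.startswith("Narrator:"):
--             context = line[len("Narrator:"):]
--         elif line.startswith("Player:"):
--             user_resp = line[len("Player:"):]
--     return context.strip(), user_resp.strip()
-- ===== SOURCE B (Python) =====
-- def extract_context_and_usertext(context: str):
--     lines = context.split("\n")
--     narrator = next((l[len("Narrator:"):] for l in reversed(lines) if l.startswith("Narrator:")), "")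
--     player = next((l[len("Player:"):] for l in reversed(lines) if l.startswith("Player:")), "")
--     return narrator.strip(), player.strip()
-- ===== Notes on version B (the rewrite author's own statement) =====
-- stated objective: simpler
-- what changed: Replaces the single forward three-branch overwriting accumulator loop by two targeted reverse scans that each find the last matching line directly, dropping the unused Area accumulator.
import Mathlib
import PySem

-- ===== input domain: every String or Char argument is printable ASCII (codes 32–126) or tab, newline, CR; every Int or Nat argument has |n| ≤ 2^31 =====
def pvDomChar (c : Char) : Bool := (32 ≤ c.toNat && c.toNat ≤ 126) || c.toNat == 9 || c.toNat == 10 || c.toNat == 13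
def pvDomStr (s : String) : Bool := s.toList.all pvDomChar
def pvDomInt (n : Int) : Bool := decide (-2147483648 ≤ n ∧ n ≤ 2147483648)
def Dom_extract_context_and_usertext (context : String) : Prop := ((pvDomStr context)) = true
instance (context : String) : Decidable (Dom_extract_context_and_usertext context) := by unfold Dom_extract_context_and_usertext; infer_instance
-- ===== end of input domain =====

-- B replaces A's forward three-branch overwriting loop by two reverse scans for the
-- last "Narrator:"/"Player:" line (objective: simpler decomposition, same cost).

-- ===== PORT A =====
-- one loop step of A's for-loop over the (area, context, user_resp) accumulator
def pvStepA (st : String × String × String) (line : String) : String × String × String :=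
  if PySem.Str.startswith line "Area:" then
    (PySem.Str.slice line (some (PySem.Str.len "Area:")) none, st.2.1, st.2.2)
  else if PySem.Str.startswith line "Narrator:" then
    (st.1, PySem.Str.slice line (some (PySem.Str.len "Narrator:")) none, st.2.2)
  else if PySem.Str.startswith line "Player:" then
    (st.1, st.2.1, PySem.Str.slice line (some (PySem.Str.len "Player:")) none)
  else st

def extract_context_and_usertext (context : String) : String × String :=
  let lines := (PySem.Str.split? context "\n").getD []  -- sep "\n" ≠ "", so split? is always some
  let st := lines.foldl pvStepA ("", "", "")
  (PySem.Str.strip st.2.1, PySem.Str.strip st.2.2)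

-- ===== PORT B =====
-- next((l[len(pfx):] for l in ls if l.startswith(pfx)), "") — ls is already reversed
def pvFindTag (pfx : String) : List String → String
  | [] => ""
  | l :: t =>
    if PySem.Str.startswith l pfx then PySem.Str.slice l (some (PySem.Str.len pfx)) none
    else pvFindTag pfx t

def extract_context_and_usertext_alt (context : String) : String × String :=
  let rev := ((PySem.Str.split? context "\n").getD []).reverse  -- sep "\n" ≠ "", split? is always some
  (PySem.Str.strip (pvFindTag "Narrator:" rev), PySem.Str.strip (pvFindTag "Player:" rev))

-- ===== PRECONDITION & SPEC =====
def Spec_extract_context_and_usertext (context : String) (out : String × String) : Prop := out = extract_context_and_usertext_alt context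
instance (context : String) (out : String × String) : Decidable (Spec_extract_context_and_usertext context out) := by unfold Spec_extract_context_and_usertext; infer_instance

-- ===== CLAIM (what is proved, stated in full; the proofs are below) =====
def Claim_equal_extract_context_and_usertext : Prop := ∀ (context : String), Dom_extract_context_and_usertext context → Spec_extract_context_and_usertext context (extract_context_and_usertext context)

-- ===== LEMMAS AND PROOFS =====

-- pvFindTag generalized with a default accumulator for the induction
def pvTagD (pfx d : String) : List String → String
  | [] => d
  | l :: t =>
    if PySem.Str.startswith l pfx then PySem.Str.slice l (some (PySem.Str.len pfx)) none
    else pvTagD pfx d t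

lemma pvTagD_eq_findTag (pfx : String) (ls : List String) : pvTagD pfx "" ls = pvFindTag pfx ls := by
  induction ls with
  | nil => rfl
  | cons l t ih => simp [pvTagD, pvFindTag, ih]

lemma pv_head_ne_not_prefix {s p q : List Char} {c d : Char} (hcd : c ≠ d)
    (hp : (c :: p) <+: s) : ¬ (d :: q) <+: s := by
  rintro ⟨t, ht⟩
  obtain ⟨t', ht'⟩ := hp
  rw [← ht'] at ht
  simp only [List.cons_append, List.cons.injEq] at ht
  exact hcd ht.1.symm

lemma pv_sw_ne {s p q : List Char} {c d : Char} (hcd : c ≠ d)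
    (h : PySem.Chars.startswith s (c :: p) = true) : PySem.Chars.startswith s (d :: q) = false := by
  rw [PySem.Chars.startswith_iff] at h
  rw [← Bool.not_eq_true, PySem.Chars.startswith_iff]
  exact pv_head_ne_not_prefix hcd h

lemma pv_fold (ls : List String) (a c u : String) :
    ls.foldl pvStepA (a, c, u) =
      (pvTagD "Area:" a ls.reverse, pvTagD "Narrator:" c ls.reverse, pvTagD "Player:" u ls.reverse) := by
  induction ls using List.reverseRecOn generalizing a c u with
  | nil => rfl
  | append_singleton xs l ih =>
    rw [List.foldl_append, ih]
    by_cases hA : PySem.Chars.startswith l.toList ['A', 'r', 'e', 'a', ':'] = true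
    · have hN := pv_sw_ne (s := l.toList) (q := ['a','r','r','a','t','o','r',':'])
        (show 'A' ≠ 'N' by decide) hA
      have hP := pv_sw_ne (s := l.toList) (q := ['l','a','y','e','r',':'])
        (show 'A' ≠ 'P' by decide) hA
      simp [pvStepA, pvTagD, hA, hN, hP]
    · by_cases hN : PySem.Chars.startswith l.toList ['N','a','r','r','a','t','o','r',':'] = true
      · have hP := pv_sw_ne (s := l.toList) (q := ['l','a','y','e','r',':'])
          (show 'N' ≠ 'P' by decide) hN
        simp [pvStepA, pvTagD, hA, hN, hP]
      · by_cases hP : PySem.Chars.startswith l.toList ['P','l','a','y','e','r',':'] = true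
        · simp [pvStepA, pvTagD, hA, hN, hP]
        · simp [pvStepA, pvTagD, hA, hN, hP]

-- ===== VERDICT (by name: the statement is the Claim_ definition above) =====
theorem extract_context_and_usertext_spec : Claim_equal_extract_context_and_usertext := by
  intro context _
  unfold Spec_extract_context_and_usertext extract_context_and_usertext extract_context_and_usertext_alt
  simp only [pv_fold, pvTagD_eq_findTag]
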